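-- pv_equiv track=rewrite | github.com/marczakdaniel/Artificial-Intelligence-University | pracownia2/z1-3.py | opt_dist
-- ===== SOURCE A (Python) =====
-- def gen_row(w, s):
--     def gen_seg(o, sp):
--         if not o:
--             return [[0] * sp]
--         return [[0] * x + o[0] + tail
--                 for x in range(1, sp - len(o) + 2)
--                 for tail in gen_seg(o[1:], sp - x)]
--
--     return [x[1:] for x in gen_seg([[1] * i for i in s], w + 1 - sum(s))]
--
-- def opt_dist(wiersz, D, j):
--     wynik1 = len(wiersz)
--
--     poprawne = gen_row(len(wiersz), D)
--     for p in poprawne: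
--         ile = 0
--         for i in range(len(p)):
--             if (p[i] != wiersz[i]):
--                 ile += 1
--         if (ile < wynik1):
--             wynik1 = ile
--         if (wynik1 == 0):
--             break
--
--     wynik2 = len(wiersz)
--     if (wiersz[j] == 0):
--         wiersz[j] = 1
--     else:
--         wiersz[j] = 0
--
--     for p in poprawne:
--         ile = 0
--         for i in range(len(p)):
--             if (p[i] != wiersz[i]):
--                 ile += 1
--         if (ile < wynik2):
--             wynik2 = ile
--         if (wynik2 == 0):
--             break
--     return wynik1, wynik2
-- ===== SOURCE B (Python) =====
-- def opt_dist(wiersz, D, j):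
--     # Memoized block/position recursion computing the min Hamming distance directly,
--     # never enumerating rows.  Same in-place flip of wiersz[j] as the original.
--     n = len(wiersz)
--
--     def solve(T):
--         memo = {}
--
--         def g(blocks, t):
--             # t is always a suffix of T, so (len(blocks), len(t)) identifies the call
--             key = (len(blocks), len(t))
--             if key in memo:
--                 return memo[key]
--             if not blocks:
--                 res = sum(1 for c in t if c != 0)
--             else:
--                 L = max(blocks[0], 0)
--                 total = L + sum(max(d, 0) for d in blocks[1:])
--                 sp = len(t) - total
--                 best = None
--                 for x in range(1, sp - len(blocks) + 2):
--                     c = sum(1 for c2 in t[:x] if c2 != 0) \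
--                         + sum(1 for c2 in t[x:x + L] if c2 != 1)
--                     r = g(blocks[1:], t[x + L:])
--                     if r is not None:
--                         cand = c + r
--                         if best is None or cand < best:
--                             best = cand
--                 res = best
--             memo[key] = res
--             return res
--
--         return g(list(D), T)
--
--     r1 = solve([0] + wiersz)
--     wynik1 = n if r1 is None else min(n, r1)
--     wiersz[j] = 1 if wiersz[j] == 0 else 0  # same in-place update as the original
--     r2 = solve([0] + wiersz)
--     wynik2 = n if r2 is None else min(n, r2)
--     return wynik1, wynik2
-- ===== Notes on version B (the rewrite author's own statement) =====
-- stated objective: faster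
-- what changed: A enumerates every valid nonogram row for the clue and scans each for its Hamming distance (twice, for the original and the flipped row); B never builds a row: a memoized recursion over (block index, remaining suffix) computes the minimum mismatch count directly, reusing each of the O(blocks*width) subproblems.
import Mathlib
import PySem

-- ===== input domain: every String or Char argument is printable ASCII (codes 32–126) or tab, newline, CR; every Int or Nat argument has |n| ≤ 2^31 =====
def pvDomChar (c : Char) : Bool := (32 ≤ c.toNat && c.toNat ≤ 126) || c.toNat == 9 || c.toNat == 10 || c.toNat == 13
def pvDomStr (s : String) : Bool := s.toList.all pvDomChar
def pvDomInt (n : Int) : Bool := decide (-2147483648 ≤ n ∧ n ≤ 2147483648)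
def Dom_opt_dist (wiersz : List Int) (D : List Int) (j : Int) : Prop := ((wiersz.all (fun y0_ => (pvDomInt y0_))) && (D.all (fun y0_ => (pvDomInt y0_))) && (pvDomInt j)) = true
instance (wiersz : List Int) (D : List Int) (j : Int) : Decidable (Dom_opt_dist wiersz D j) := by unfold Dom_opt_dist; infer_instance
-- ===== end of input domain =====

-- B replaces A's exponential enumeration of all valid rows by a memoized block/position
-- recursion that computes the minimum Hamming distance directly (objective: faster).
-- Both A and B flip wiersz[j] in place in the same way; the theorems are about the return value.

-- ===== PORT A =====

-- gen_seg(o, sp): [0]*x with x : Int is List.replicate x.toNat ([0]*x = [] for x ≤ 0, exact)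
def pvGenSeg : List (List Int) → Int → List (List Int)
  | [], sp => [List.replicate sp.toNat 0]
  | o :: os, sp =>
      (PySem.List.pyRange 1 (sp - ((os.length : Int) + 1) + 2) 1).flatMap
        (fun x => (pvGenSeg os (sp - x)).map
          (fun tail => List.replicate x.toNat 0 ++ o ++ tail))

-- gen_row(w, s); x[1:] on a list is List.drop 1 (exact)
def pvGenRow (w : Int) (s : List Int) : List (List Int) :=
  (pvGenSeg (s.map (fun i => List.replicate i.toNat 1)) (w + 1 - s.sum)).map
    (fun x => x.drop 1)

-- the inner counting loop 'for i in range(len(p)): if p[i] != wiersz[i]: ile += 1'.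
-- p[i] is always in range; wiersz[i] is in range for every row inside Pre_ (getD is exact there;
-- outside Pre_ the Python raises IndexError).
def pvCount (wiersz p : List Int) : Int :=
  (List.range p.length).foldl
    (fun ile i => if p.getD i 0 ≠ wiersz.getD i 0 then ile + 1 else ile) 0

-- the 'for p in poprawne' loop with its early break at 0
def pvMinLoop (wiersz : List Int) : List (List Int) → Int → Int
  | [], w => w
  | p :: ps, w =>
      let ile := pvCount wiersz p
      let w' := if ile < w then ile else w
      if w' = 0 then w' else pvMinLoop wiersz ps w'

def opt_dist (wiersz : List Int) (D : List Int) (j : Int) : Int × Int :=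
  let n : Int := wiersz.length
  let poprawne := pvGenRow n D
  let wynik1 := pvMinLoop wiersz poprawne n
  -- wiersz[j] = 1 if it was 0, else 0 (in-place; j may be negative, Python wraps)
  let jn := (if j < 0 then j + n else j).toNat
  let w2 := wiersz.set jn (if wiersz.getD jn 0 = 0 then 1 else 0)
  let wynik2 := pvMinLoop w2 poprawne n
  (wynik1, wynik2)

-- ===== PORT B =====

-- sum(1 for c in t if c != 0)  /  != 1
def pvCount0 (t : List Int) : Int := t.foldl (fun a c => if c ≠ 0 then a + 1 else a) 0
def pvCount1 (t : List Int) : Int := t.foldl (fun a c => if c ≠ 1 then a + 1 else a) 0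

-- g(blocks, t) of Source B; the memo cache is dropped: the pure recursion computes the same values
def pvG : List Int → List Int → Option Int
  | [], t => some (pvCount0 t)
  | d :: rest, t =>
      let L := max d 0
      let total := L + (rest.map (fun d' => max d' 0)).sum
      let sp := (t.length : Int) - total
      (PySem.List.pyRange 1 (sp - ((rest.length : Int) + 1) + 2) 1).foldl
        (fun best x =>
          let c := pvCount0 (PySem.List.slice t none (some x)) +
                   pvCount1 (PySem.List.slice t (some x) (some (x + L)))
          match pvG rest (PySem.List.slice t (some (x + L)) none) with
          | none => best
          | some r =>
            let cand := c + r
            match best with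
            | none => some cand
            | some b => if cand < b then some cand else best)
        none

def opt_dist_alt (wiersz : List Int) (D : List Int) (j : Int) : Int × Int :=
  let n : Int := wiersz.length
  let r1 := pvG D (0 :: wiersz)
  let wynik1 := match r1 with | none => n | some v => min n v
  -- same in-place flip of wiersz[j] as the original
  let jn := (if j < 0 then j + n else j).toNat
  let w2 := wiersz.set jn (if wiersz.getD jn 0 = 0 then 1 else 0)
  let r2 := pvG D (0 :: w2)
  let wynik2 := match r2 with | none => n | some v => min n v
  (wynik1, wynik2)

-- ===== PRECONDITION & SPEC =====
-- Pre_ excludes exactly the inputs where A raises IndexError: j out of range for wiersz, and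
-- clue lists with a negative entry whenever some row gets generated (the generated rows are then
-- longer than wiersz, so A's comparison loop overruns wiersz); the second disjunct keeps the
-- inputs where no row is generated at all, on which A returns normally.
def Pre_opt_dist (wiersz : List Int) (D : List Int) (j : Int) : Prop :=
  PySem.Raise.InRange wiersz.length j ∧
    ((∀ d ∈ D, 0 ≤ d) ∨ ((wiersz.length : Int) + 1 - D.sum < (D.length : Int)))
instance (wiersz : List Int) (D : List Int) (j : Int) : Decidable (Pre_opt_dist wiersz D j) := by
  unfold Pre_opt_dist; infer_instance

def pvWitness_opt_dist : List Int × List Int × Int := ([0, 1, 0], [1], 1)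

def Spec_opt_dist (wiersz : List Int) (D : List Int) (j : Int) (out : Int × Int) : Prop := out = opt_dist_alt wiersz D j
instance (wiersz : List Int) (D : List Int) (j : Int) (out : Int × Int) : Decidable (Spec_opt_dist wiersz D j out) := by unfold Spec_opt_dist; infer_instance

-- ===== CLAIM (what is proved, stated in full; the proofs are below) =====
def Claim_equal_opt_dist : Prop := ∀ (wiersz : List Int) (D : List Int) (j : Int), Dom_opt_dist wiersz D j → Pre_opt_dist wiersz D j → Spec_opt_dist wiersz D j (opt_dist wiersz D j)

-- ===== LEMMAS AND PROOFS =====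

-- structural mismatch count (Hamming distance over the common prefix)
def pvMism : List Int → List Int → Int
  | [], _ => 0
  | _ :: _, [] => 0
  | a :: s, b :: t => (if a ≠ b then 1 else 0) + pvMism s t

-- min of two optional ints (none = "no candidate yet")
def pvOmin : Option Int → Option Int → Option Int
  | none, y => y
  | some a, none => some a
  | some a, some b => some (min a b)

-- minimum mismatch count over a list of rows
def pvMinHam : List (List Int) → List Int → Option Int
  | [], _ => none
  | r :: rs, t => pvOmin (some (pvMism r t)) (pvMinHam rs t)

theorem pvOmin_none_left (y : Option Int) : pvOmin none y = y := rfl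

theorem pvOmin_assoc (a b c : Option Int) : pvOmin (pvOmin a b) c = pvOmin a (pvOmin b c) := by
  cases a <;> cases b <;> cases c <;> simp [pvOmin, min_assoc]

theorem pvMism_nonneg (s t : List Int) : 0 ≤ pvMism s t := by
  induction s generalizing t with
  | nil => simp [pvMism]
  | cons a s ih =>
    cases t with
    | nil => simp [pvMism]
    | cons b t => have := ih t; simp only [pvMism]; split_ifs <;> omega

theorem pvMism_nil_right (s : List Int) : pvMism s [] = 0 := by
  cases s <;> rfl

theorem pvMism_append (s1 s2 t : List Int) :
    pvMism (s1 ++ s2) t = pvMism s1 t + pvMism s2 (t.drop s1.length) := by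
  induction s1 generalizing t with
  | nil => simp [pvMism]
  | cons a s ih =>
    cases t with
    | nil => simp [pvMism, pvMism_nil_right]
    | cons b t => simp only [List.cons_append, pvMism, ih, List.length_cons, List.drop_succ_cons]; ring

theorem pvCount0_eq (t : List Int) : pvCount0 t = ((t.countP (fun c => decide (c ≠ 0))) : Int) := by
  unfold pvCount0
  simpa using PySem.List.foldl_ite_add_one (fun c => c ≠ 0) t 0

theorem pvCount1_eq (t : List Int) : pvCount1 t = ((t.countP (fun c => decide (c ≠ 1))) : Int) := by
  unfold pvCount1
  simpa using PySem.List.foldl_ite_add_one (fun c => c ≠ 1) t 0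

theorem pvMism_replicate (v : Int) (m : Nat) (t : List Int) :
    pvMism (List.replicate m v) t = ((t.take m).countP (fun c => decide (c ≠ v)) : Int) := by
  induction m generalizing t with
  | zero => simp [pvMism]
  | succ k ih =>
    cases t with
    | nil => simp [pvMism_nil_right]
    | cons b t =>
      simp only [List.replicate_succ, pvMism, ih, List.take_succ_cons, List.countP_cons]
      by_cases hb : b = v
      · subst hb; simp
      · have h1 : v ≠ b := fun h => hb h.symm
        simp only [if_pos h1, hb, decide_not, decide_false, Bool.not_false, if_true]
        push_cast; ring

theorem pvMism_replicate_zero (m : Nat) (t : List Int) :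
    pvMism (List.replicate m 0) t = pvCount0 (t.take m) := by
  rw [pvCount0_eq, pvMism_replicate]

theorem pvMism_replicate_one (m : Nat) (t : List Int) :
    pvMism (List.replicate m 1) t = pvCount1 (t.take m) := by
  rw [pvCount1_eq, pvMism_replicate]

theorem pvCount_countP (wz p : List Int) (h : p.length ≤ wz.length) :
    ((List.range p.length).countP (fun i => decide (p.getD i 0 ≠ wz.getD i 0)) : Int)
      = pvMism p wz := by
  induction p generalizing wz with
  | nil => simp [pvMism]
  | cons a s ih =>
    cases wz with
    | nil => simp at h
    | cons b t =>
      simp only [List.length_cons, List.range_succ_eq_map, List.countP_cons, List.countP_map]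
      have hcomp : ((fun i => decide ((a :: s).getD i 0 ≠ (b :: t).getD i 0)) ∘ Nat.succ)
          = fun i => decide (s.getD i 0 ≠ t.getD i 0) := by
        funext i; simp [Function.comp]
      rw [hcomp]
      have hih := ih t (by simpa using Nat.succ_le_succ_iff.mp h)
      simp only [List.getD_cons_zero, pvMism]
      by_cases hab : a = b <;> simp [hab] at hih ⊢ <;> omega

theorem pvCount_eq_mism (wz p : List Int) (h : p.length ≤ wz.length) :
    pvCount wz p = pvMism p wz := by
  unfold pvCount
  rw [PySem.List.foldl_ite_add_one (fun i => p.getD i 0 ≠ wz.getD i 0) (List.range p.length) 0]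
  rw [zero_add, pvCount_countP wz p h]

theorem pvMinHam_nonneg (rs : List (List Int)) (t : List Int) (m : Int)
    (h : pvMinHam rs t = some m) : 0 ≤ m := by
  induction rs generalizing m with
  | nil => simp [pvMinHam] at h
  | cons r rs ih =>
    simp only [pvMinHam] at h
    cases hrs : pvMinHam rs t with
    | none => rw [hrs] at h; simp [pvOmin] at h; subst h; exact pvMism_nonneg r t
    | some m' =>
      rw [hrs] at h; simp [pvOmin] at h; subst h
      have := pvMism_nonneg r t; have := ih m' hrs
      omega

theorem pvMinHam_append (l1 l2 : List (List Int)) (t : List Int) :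
    pvMinHam (l1 ++ l2) t = pvOmin (pvMinHam l1 t) (pvMinHam l2 t) := by
  induction l1 with
  | nil => simp [pvMinHam, pvOmin_none_left]
  | cons r rs ih => simp only [List.cons_append, pvMinHam, ih, pvOmin_assoc]

theorem pvMinHam_map_prefix (rs : List (List Int)) (pre t : List Int) :
    pvMinHam (rs.map (fun r => pre ++ r)) t
      = Option.map (fun m => pvMism pre t + m) (pvMinHam rs (t.drop pre.length)) := by
  induction rs with
  | nil => simp [pvMinHam]
  | cons r rs ih =>
    simp only [List.map_cons, pvMinHam, ih, pvMism_append]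
    cases pvMinHam rs (t.drop pre.length) with
    | none => simp [pvOmin]
    | some m => simp only [Option.map_some, pvOmin, Option.some.injEq]; omega

theorem pvMinHam_map_drop (rs : List (List Int)) (t : List Int)
    (h : ∀ r ∈ rs, ∃ r', r = (0 : Int) :: r') :
    pvMinHam (rs.map (fun x => x.drop 1)) t = pvMinHam rs (0 :: t) := by
  induction rs with
  | nil => rfl
  | cons r rs ih =>
    obtain ⟨r', rfl⟩ := h r List.mem_cons_self
    simp only [List.map_cons, pvMinHam, pvMism]
    rw [ih (fun r hr => h r (List.mem_cons_of_mem _ hr))]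
    simp

theorem pvMinLoop_eq (wz : List Int) (rs : List (List Int)) (w : Int)
    (hlen : ∀ p ∈ rs, p.length ≤ wz.length) (hw : 0 ≤ w) :
    pvMinLoop wz rs w = (match pvMinHam rs wz with | none => w | some m => min w m) := by
  induction rs generalizing w with
  | nil => rfl
  | cons p ps ih =>
    have hcnt : pvCount wz p = pvMism p wz :=
      pvCount_eq_mism wz p (hlen p List.mem_cons_self)
    have hnn := pvMism_nonneg p wz
    simp only [pvMinLoop, pvMinHam, hcnt]
    by_cases h0 : (if pvMism p wz < w then pvMism p wz else w) = 0
    · rw [if_pos h0]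
      cases hm : pvMinHam ps wz with
      | none => simp only [pvOmin, min_def]; split_ifs at h0 ⊢ <;> omega
      | some m =>
        have hm0 := pvMinHam_nonneg ps wz m hm
        simp only [pvOmin, min_def]
        split_ifs at h0 ⊢ <;> omega
    · rw [if_neg h0]
      rw [ih _ (fun q hq => hlen q (List.mem_cons_of_mem _ hq)) (by split_ifs <;> omega)]
      cases hm : pvMinHam ps wz with
      | none => simp only [pvOmin, min_def]; split_ifs <;> omega
      | some m =>
        have hm0 := pvMinHam_nonneg ps wz m hm
        simp only [pvOmin, min_def]
        split_ifs <;> omega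

theorem pvFoldl_omin (f : Int → Option Int) (xs : List Int) (acc : Option Int) :
    xs.foldl (fun m x => pvOmin m (f x)) acc
      = pvOmin acc (xs.foldl (fun m x => pvOmin m (f x)) none) := by
  induction xs generalizing acc with
  | nil => cases acc <;> rfl
  | cons x xs ih =>
    simp only [List.foldl_cons]
    rw [ih, ih (acc := pvOmin none (f x)), pvOmin_none_left, ← pvOmin_assoc]

theorem pvMinHam_flatMap (xs : List Int) (g : Int → List (List Int)) (t : List Int) :
    pvMinHam (xs.flatMap g) t = xs.foldl (fun m x => pvOmin m (pvMinHam (g x) t)) none := by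
  induction xs with
  | nil => rfl
  | cons x xs ih =>
    simp only [List.flatMap_cons, pvMinHam_append, List.foldl_cons, ih]
    rw [pvFoldl_omin _ xs (pvOmin none (pvMinHam (g x) t)), pvOmin_none_left]

theorem pvStep_eq (best : Option Int) (c : Int) (o : Option Int) :
    (match o with
     | none => best
     | some r =>
       match best with
       | none => some (c + r)
       | some b => if c + r < b then some (c + r) else best)
    = pvOmin best (Option.map (fun r => c + r) o) := by
  cases o with
  | none => cases best <;> rfl
  | some r =>
    cases best with
    | none => rfl
    | some b =>
      simp only [Option.map_some, pvOmin]
      split_ifs with h <;> simp only [Option.some.injEq, min_def] <;> split_ifs <;> omega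

theorem pvSum_max_nonneg (l : List Int) : 0 ≤ (l.map (fun d => max d 0)).sum := by
  induction l with
  | nil => simp
  | cons a l ih => simp only [List.map_cons, List.sum_cons]; have : 0 ≤ max a 0 := le_max_right a 0; omega

theorem pvSum_le_sum_max (l : List Int) : l.sum ≤ (l.map (fun d => max d 0)).sum := by
  induction l with
  | nil => simp
  | cons a l ih => simp only [List.map_cons, List.sum_cons]; have : a ≤ max a 0 := le_max_left a 0; omega

theorem pvMain (Ds : List Int) (sp : Int) (t : List Int)
    (h : (t.length : Int) = sp + (Ds.map (fun d => max d 0)).sum) :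
    pvMinHam (pvGenSeg (Ds.map (fun i => List.replicate i.toNat 1)) sp) t = pvG Ds t := by
  induction Ds generalizing sp t with
  | nil =>
    simp only [List.map_nil, List.sum_nil, add_zero] at h
    simp only [List.map_nil, pvGenSeg, pvG, pvMinHam, pvOmin]
    rw [pvMism_replicate_zero]
    have hsp : sp.toNat = t.length := by omega
    rw [hsp, List.take_length]
  | cons d rest ih =>
    simp only [List.map_cons, List.sum_cons] at h
    have hSig : 0 ≤ (rest.map (fun d' => max d' 0)).sum := pvSum_max_nonneg rest
    have hd0 : (0 : Int) ≤ max d 0 := le_max_right d 0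
    have hdd : ((d.toNat : Int)) = max d 0 := Int.ofNat_toNat d
    simp only [List.map_cons, pvGenSeg, pvG, List.length_map]
    have hsp : (t.length : Int) - (max d 0 + (rest.map (fun d' => max d' 0)).sum) = sp := by
      omega
    rw [hsp, pvMinHam_flatMap]
    apply PySem.List.foldl_congr_mem
    intro acc x hx
    obtain ⟨hx1, hx2⟩ := PySem.List.mem_pyRange_one.mp hx
    have h0x : (0 : Int) ≤ x := by omega
    have hxx : ((x.toNat : Int)) = x := Int.toNat_of_nonneg h0x
    have hrl : (0 : Int) ≤ (rest.length : Int) := Int.natCast_nonneg _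
    rw [pvStep_eq]
    rw [PySem.List.slice_to _ h0x, PySem.List.slice_toNat _ h0x (by omega),
        PySem.List.slice_from _ (by omega : (0 : Int) ≤ x + max d 0)]
    have htn : (x + max d 0).toNat = x.toNat + d.toNat := by omega
    rw [htn, Nat.add_sub_cancel_left]
    rw [pvMinHam_map_prefix]
    have hlen' : (((t.drop (List.replicate x.toNat (0:Int) ++ List.replicate d.toNat (1:Int)).length).length : Int))
        = (sp - x) + (rest.map (fun d' => max d' 0)).sum := by
      simp only [List.length_append, List.length_replicate, List.length_drop]
      omega
    rw [ih (sp - x) _ (by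
      simp only [List.length_append, List.length_replicate]
      simpa using hlen')]
    rw [pvMism_append, pvMism_replicate_zero, pvMism_replicate_one,
        List.length_replicate, List.length_append, List.length_replicate]
    simp only [List.length_replicate]

theorem pvGenSeg_head (o : List (List Int)) (sp : Int) (h : o = [] → 1 ≤ sp) :
    ∀ r ∈ pvGenSeg o sp, ∃ r', r = (0 : Int) :: r' := by
  intro r hr
  cases o with
  | nil =>
    simp only [pvGenSeg, List.mem_singleton] at hr
    subst hr
    have h1 : 1 ≤ sp := h rfl
    obtain ⟨k, hk⟩ : ∃ k, sp.toNat = k + 1 := ⟨sp.toNat - 1, by omega⟩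
    exact ⟨List.replicate k 0, by rw [hk, List.replicate_succ]⟩
  | cons b os =>
    simp only [pvGenSeg, List.mem_flatMap] at hr
    obtain ⟨x, hx, hr⟩ := hr
    obtain ⟨tail, _, rfl⟩ := List.mem_map.mp hr
    have hx1 : 1 ≤ x := (PySem.List.mem_pyRange_one.mp hx).1
    obtain ⟨k, hk⟩ : ∃ k, x.toNat = k + 1 := ⟨x.toNat - 1, by omega⟩
    exact ⟨List.replicate k 0 ++ b ++ tail, by rw [hk, List.replicate_succ]; simp⟩

theorem pvGenSeg_mem_length (o : List (List Int)) (sp : Int) :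
    ∀ r ∈ pvGenSeg o sp,
      (r.length : Int) = max sp 0 + (o.map (fun b => (b.length : Int))).sum ∧ (o = [] ∨ 1 ≤ sp) := by
  induction o generalizing sp with
  | nil =>
    intro r hr
    simp only [pvGenSeg, List.mem_singleton] at hr
    subst hr
    simp [Int.ofNat_toNat]
  | cons b os ih =>
    intro r hr
    simp only [pvGenSeg, List.mem_flatMap] at hr
    obtain ⟨x, hx, hr⟩ := hr
    obtain ⟨tail, htail, rfl⟩ := List.mem_map.mp hr
    obtain ⟨hx1, hx2⟩ := PySem.List.mem_pyRange_one.mp hx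
    obtain ⟨hlen, hcase⟩ := ih (sp - x) tail htail
    have hosn : (0 : Int) ≤ os.length := Int.natCast_nonneg _
    have hspx : (os.length : Int) ≤ sp - x := by
      rcases hcase with hnil | hge
      · subst hnil; simp only [List.length_nil]; omega
      · omega
    constructor
    · simp only [List.length_append, List.length_replicate, List.map_cons, List.sum_cons]
      push_cast
      rw [hlen]
      rw [max_eq_left (by omega : (0:Int) ≤ sp), max_eq_left (by omega : (0:Int) ≤ sp - x)]
      have : ((x.toNat : Int)) = x := Int.toNat_of_nonneg (by omega)
      omega
    · right; omega

theorem pvTop (wz t0 : List Int) (D : List Int) (h : t0.length = wz.length)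
    (hD : (∀ d ∈ D, 0 ≤ d) ∨ ((wz.length : Int) + 1 - D.sum < (D.length : Int))) :
    pvMinLoop t0 (pvGenRow (wz.length : Int) D) (wz.length : Int)
      = (match pvG D (0 :: t0) with | none => ((wz.length : Int)) | some v => min (wz.length : Int) v) := by
  have hn0 : (0 : Int) ≤ (wz.length : Int) := Int.natCast_nonneg _
  rcases hD with hnn | hinf
  · -- all clue entries nonnegative
    have hmap : D.map (fun d => max d 0) = D := by
      calc D.map (fun d => max d 0) = D.map id :=
            List.map_congr_left (fun d hd => max_eq_left (hnn d hd))
        _ = D := List.map_id D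
    have hlen1 : (((0 : Int) :: t0).length : Int)
        = ((wz.length : Int) + 1 - D.sum) + (D.map (fun d => max d 0)).sum := by
      simp only [List.length_cons, hmap, h]
      push_cast; ring
    have hmain := pvMain D ((wz.length : Int) + 1 - D.sum) (0 :: t0) hlen1
    unfold pvGenRow
    have hhead : ∀ r ∈ pvGenSeg (D.map (fun i => List.replicate i.toNat 1))
        ((wz.length : Int) + 1 - D.sum), ∃ r', r = (0 : Int) :: r' := by
      apply pvGenSeg_head
      intro hmapnil
      have hDnil : D = [] := by simpa using hmapnil
      subst hDnil; simp only [List.sum_nil]; omega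
    have hrows : ∀ p ∈ (pvGenSeg (D.map (fun i => List.replicate i.toNat 1))
        ((wz.length : Int) + 1 - D.sum)).map (fun x => x.drop 1), p.length ≤ t0.length := by
      intro p hp
      obtain ⟨r, hr, rfl⟩ := List.mem_map.mp hp
      obtain ⟨hlen, hcase⟩ := pvGenSeg_mem_length _ _ r hr
      have hbs : ((D.map (fun i => List.replicate i.toNat (1 : Int))).map
          (fun b => (b.length : Int))).sum = D.sum := by
        rw [List.map_map]
        have hfe : ((fun b => ((b : List Int).length : Int)) ∘ (fun i : Int => List.replicate i.toNat (1 : Int)))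
            = fun i : Int => ((i.toNat : Int)) := by
          funext i; simp
        rw [hfe]
        have h2 : D.map (fun i : Int => ((i.toNat : Int))) = D.map id :=
          List.map_congr_left (fun d hd => Int.toNat_of_nonneg (hnn d hd))
        rw [h2, List.map_id]
      rw [hbs] at hlen
      have hsp0 : (0 : Int) ≤ (wz.length : Int) + 1 - D.sum := by
        rcases hcase with hnil | h1
        · have hDnil : D = [] := by simpa using hnil
          subst hDnil; simp only [List.sum_nil]; omega
        · omega
      rw [max_eq_left hsp0] at hlen
      have hlr : r.length = wz.length + 1 := by omega
      simp only [List.length_drop, hlr, h]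
      omega
    rw [pvMinLoop_eq t0 _ _ hrows hn0]
    rw [pvMinHam_map_drop _ _ hhead, hmain]
  · -- no row can be generated at all: both programs return the row length
    cases D with
    | nil => exfalso; simp only [List.sum_nil, List.length_nil] at hinf; omega
    | cons d rest =>
      simp only [List.sum_cons, List.length_cons] at hinf
      have hle := pvSum_le_sum_max rest
      have hmd : d ≤ max d 0 := le_max_left d 0
      have hrl : (0 : Int) ≤ (rest.length : Int) := Int.natCast_nonneg _
      unfold pvGenRow
      simp only [List.map_cons, pvGenSeg, List.length_map]
      rw [PySem.List.pyRange_one_eq_nil (by simp only [List.sum_cons]; push_cast at hinf ⊢; omega)]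
      simp only [List.flatMap_nil, List.map_nil]
      simp only [pvG]
      rw [PySem.List.pyRange_one_eq_nil (by
        simp only [List.length_cons]
        push_cast at hinf ⊢
        omega)]
      simp only [List.foldl_nil]
      rfl

-- ===== VERDICT (by name: the statement is the Claim_ definition above) =====
theorem opt_dist_spec : Claim_equal_opt_dist := by
  intro wz D j _hDom hPre
  unfold Spec_opt_dist opt_dist opt_dist_alt
  have h1 := pvTop wz wz D rfl hPre.2
  have h2 := pvTop wz (wz.set (if j < 0 then j + (wz.length : Int) else j).toNat
      (if wz.getD (if j < 0 then j + (wz.length : Int) else j).toNat 0 = 0 then 1 else 0)) D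
      (by simp) hPre.2
  dsimp only
  rw [h1, h2]
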